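-- pv_equiv track=rewrite | github.com/shreyasrajesh0308/platinum-benchmarks | create_platinum_simple.py | _check_answer_match
-- ===== SOURCE A (Python) =====
-- from typing import List, Dict, Any
--
-- def _check_answer_match(predicted: str, gold_answers: List[str]) -> tuple[str, bool]:
--     """Check answer match and return match type.
--
--     Args:
--         predicted: Predicted answer
--         gold_answers: List of gold answers
--
--     Returns:
--         Tuple of (match_type, is_correct)
--         match_type: "exact", "substring", or "none"
--         is_correct: True if exact or substring match
--     """
--     predicted_lower = predicted.lower().strip()
--
--     for gold in gold_answers:
--         gold_lower = gold.lower().strip()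
--
--         # Exact match
--         if predicted_lower == gold_lower:
--             return ("exact", True)
--
--     # Check substring match
--     for gold in gold_answers:
--         gold_lower = gold.lower().strip()
--
--         # Substring match (either direction)
--         if gold_lower in predicted_lower or predicted_lower in gold_lower:
--             return ("substring", True)
--
--     # No match
--     return ("none", False)
-- ===== SOURCE B (Python) =====
-- def _check_answer_match(predicted, gold_answers):
--     """Single pass over gold_answers: return exact match immediately, remember a
--     substring hit in a flag, and decide substring/none after the loop."""
--     predicted_lower = predicted.lower().strip()
--     found_substring = False
--     for gold in gold_answers:
--         gold_lower = gold.lower().strip()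
--         if predicted_lower == gold_lower:
--             return ("exact", True)
--         if not found_substring and (gold_lower in predicted_lower or predicted_lower in gold_lower):
--             found_substring = True
--     if found_substring:
--         return ("substring", True)
--     return ("none", False)
-- ===== Notes on version B (the rewrite author's own statement) =====
-- stated objective: simpler
-- what changed: The two sequential loops over gold_answers are fused into one pass that returns on an exact match and records a substring hit in a flag decided after the loop.
import Mathlib
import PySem

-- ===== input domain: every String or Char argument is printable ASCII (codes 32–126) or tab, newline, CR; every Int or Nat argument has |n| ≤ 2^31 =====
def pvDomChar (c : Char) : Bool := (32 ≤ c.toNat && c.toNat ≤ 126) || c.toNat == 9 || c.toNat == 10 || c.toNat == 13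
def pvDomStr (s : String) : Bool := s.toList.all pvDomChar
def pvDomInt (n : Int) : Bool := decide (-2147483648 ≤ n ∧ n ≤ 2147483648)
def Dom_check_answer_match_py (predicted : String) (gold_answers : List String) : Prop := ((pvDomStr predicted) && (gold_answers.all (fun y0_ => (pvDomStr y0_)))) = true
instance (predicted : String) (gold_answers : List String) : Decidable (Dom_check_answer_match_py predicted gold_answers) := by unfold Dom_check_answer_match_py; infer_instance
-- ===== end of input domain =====

-- B fuses A's two sequential loops over gold_answers into a single pass with a substring flag; same result everywhere.

-- shared helper: gold.lower().strip()
def pvNorm (s : String) : String := PySem.Str.strip (PySem.Str.lower s)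

-- the substring condition 'gold_lower in predicted_lower or predicted_lower in gold_lower'
def pvQ (pl g : String) : Bool := PySem.Str.isIn (pvNorm g) pl || PySem.Str.isIn pl (pvNorm g)

-- ===== PORT A =====
-- first loop of A: scan for an exact match
def pvExactLoop (pl : String) : List String → Option (String × Bool)
  | [] => none
  | g :: gs => if pl = pvNorm g then some ("exact", true) else pvExactLoop pl gs

-- second loop of A: scan for a substring match (either direction)
def pvSubLoop (pl : String) : List String → Option (String × Bool)
  | [] => none
  | g :: gs =>
    if pvQ pl g then some ("substring", true)
    else pvSubLoop pl gs

def check_answer_match_py (predicted : String) (gold_answers : List String) : String × Bool :=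
  let pl := pvNorm predicted
  match pvExactLoop pl gold_answers with
  | some r => r
  | none =>
    match pvSubLoop pl gold_answers with
    | some r => r
    | none => ("none", false)

-- ===== PORT B =====
-- single pass carrying the found_substring flag
def pvAltLoop (pl : String) (found : Bool) : List String → String × Bool
  | [] => if found then ("substring", true) else ("none", false)
  | g :: gs =>
    if pl = pvNorm g then ("exact", true)
    else pvAltLoop pl (if !found && pvQ pl g then true else found) gs

def check_answer_match_py_alt (predicted : String) (gold_answers : List String) : String × Bool :=
  pvAltLoop (pvNorm predicted) false gold_answers

-- ===== PRECONDITION & SPEC =====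
def Spec_check_answer_match_py (predicted : String) (gold_answers : List String) (out : String × Bool) : Prop := out = check_answer_match_py_alt predicted gold_answers
instance (predicted : String) (gold_answers : List String) (out : String × Bool) : Decidable (Spec_check_answer_match_py predicted gold_answers out) := by unfold Spec_check_answer_match_py; infer_instance

-- ===== CLAIM (what is proved, stated in full; the proofs are below) =====
def Claim_equal_check_answer_match_py : Prop := ∀ (predicted : String) (gold_answers : List String), Dom_check_answer_match_py predicted gold_answers → Spec_check_answer_match_py predicted gold_answers (check_answer_match_py predicted gold_answers)

-- ===== LEMMAS AND PROOFS =====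

lemma pvExactLoop_eq (pl : String) (gs : List String) :
    pvExactLoop pl gs =
      if gs.any (fun g => pl = pvNorm g) then some ("exact", true) else none := by
  induction gs with
  | nil => simp [pvExactLoop]
  | cons g gs ih =>
    by_cases h : pl = pvNorm g <;> simp [pvExactLoop, h, ih]

lemma pvSubLoop_eq (pl : String) (gs : List String) :
    pvSubLoop pl gs =
      if gs.any (pvQ pl) then some ("substring", true) else none := by
  induction gs with
  | nil => simp [pvSubLoop]
  | cons g gs ih =>
    rw [pvSubLoop, ih]
    cases hq : pvQ pl g <;> simp [List.any_cons, hq]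

lemma pvAltLoop_eq (pl : String) (gs : List String) : ∀ (found : Bool),
    pvAltLoop pl found gs =
      if gs.any (fun g => pl = pvNorm g) then ("exact", true)
      else if found || gs.any (pvQ pl) then ("substring", true)
      else ("none", false) := by
  induction gs with
  | nil => intro found; cases found <;> simp [pvAltLoop]
  | cons g gs ih =>
    intro found
    by_cases h : pl = pvNorm g
    · simp [pvAltLoop, h]
    · rw [pvAltLoop, ih]
      cases found <;> cases hq : pvQ pl g <;> simp [List.any_cons, h, hq]

-- ===== VERDICT (by name: the statement is the Claim_ definition above) =====
theorem check_answer_match_py_spec : Claim_equal_check_answer_match_py := by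
  intro predicted gold_answers _
  simp only [Spec_check_answer_match_py, check_answer_match_py, check_answer_match_py_alt]
  rw [pvExactLoop_eq, pvSubLoop_eq, pvAltLoop_eq]
  cases he : gold_answers.any (fun g => decide (pvNorm predicted = pvNorm g)) <;>
    cases hs : gold_answers.any (pvQ (pvNorm predicted)) <;>
      simp [he, hs]
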